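-- pv_equiv track=rewrite | github.com/OmniNode-ai/omnibase | legacy/util/util_header.py | extract_shebang
-- ===== SOURCE A (Python) =====
-- from typing import List, Optional, Tuple
--
-- def extract_shebang(lines: List[str]) -> Tuple[Optional[str], List[str]]:
--     """
--     Find a shebang (#!...) anywhere in the file, remove it, and return (shebang, lines_without_shebang).
--     If no shebang is found, returns (None, lines).
--     """
--     shebang = None
--     new_lines = []
--     for line in lines:
--         if shebang is None and line.startswith("#!"):
--             shebang = line
--         else:
--             new_lines.append(line)
--     return shebang, new_lines
-- ===== SOURCE B (Python) =====
-- from typing import List, Optional, Tuple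
--
-- def extract_shebang(lines: List[str]) -> Tuple[Optional[str], List[str]]:
--     idx = next((i for i, line in enumerate(lines) if line.startswith("#!")), None)
--     if idx is None:
--         return None, list(lines)
--     return lines[idx], lines[:idx] + lines[idx + 1:]
-- ===== Notes on version B (the rewrite author's own statement) =====
-- stated objective: simpler
-- what changed: Replaces A's accumulating loop with hidden shebang state by a find-first-index step followed by slice-and-splice of the original list.
import Mathlib
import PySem

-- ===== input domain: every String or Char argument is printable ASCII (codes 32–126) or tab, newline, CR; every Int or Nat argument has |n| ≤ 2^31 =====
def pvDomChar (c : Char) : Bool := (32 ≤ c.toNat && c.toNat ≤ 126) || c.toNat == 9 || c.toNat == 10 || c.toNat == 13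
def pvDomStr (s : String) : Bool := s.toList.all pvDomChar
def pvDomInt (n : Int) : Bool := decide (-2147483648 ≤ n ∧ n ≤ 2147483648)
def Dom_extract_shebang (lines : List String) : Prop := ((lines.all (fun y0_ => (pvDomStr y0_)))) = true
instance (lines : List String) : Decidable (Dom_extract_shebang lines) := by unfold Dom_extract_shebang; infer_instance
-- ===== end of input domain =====

-- B replaces A's single accumulating loop (shebang state + append loop) with
-- find-first-index then slice-and-splice; objective: simpler decomposition.

-- ===== PORT A =====
def extract_shebang_loop (shebang : Option String) (new_lines : List String) :
    List String → Option String × List String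
  | [] => (shebang, new_lines)
  | line :: rest =>
      if shebang = none ∧ PySem.Str.startswith line "#!" then
        extract_shebang_loop (some line) new_lines rest
      else
        extract_shebang_loop shebang (new_lines ++ [line]) rest

def extract_shebang (lines : List String) : Option String × List String :=
  extract_shebang_loop none [] lines

-- ===== PORT B =====
-- next((i for i, line in enumerate(lines) if line.startswith("#!")), None)
def extract_shebang_findIdx : List String → Option Nat
  | [] => none
  | line :: rest =>
      if PySem.Str.startswith line "#!" then some 0
      else (extract_shebang_findIdx rest).map (· + 1)

def extract_shebang_alt (lines : List String) : Option String × List String :=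
  match extract_shebang_findIdx lines with
  | none => (none, lines)
  | some idx =>
      (lines[idx]?.getD "",
       PySem.List.slice lines none (some (idx : Int)) ++
         PySem.List.slice lines (some ((idx : Int) + 1)) none)

-- ===== PRECONDITION & SPEC =====
def Spec_extract_shebang (lines : List String) (out : Option String × List String) : Prop := out = extract_shebang_alt lines
instance (lines : List String) (out : Option String × List String) : Decidable (Spec_extract_shebang lines out) := by unfold Spec_extract_shebang; infer_instance

-- ===== CLAIM (what is proved, stated in full; the proofs are below) =====
def Claim_equal_extract_shebang : Prop := ∀ (lines : List String), Dom_extract_shebang lines → Spec_extract_shebang lines (extract_shebang lines)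

-- ===== LEMMAS AND PROOFS =====

theorem loop_some (s : String) (acc : List String) (ls : List String) :
    extract_shebang_loop (some s) acc ls = (some s, acc ++ ls) := by
  induction ls generalizing acc with
  | nil => simp [extract_shebang_loop]
  | cons l rest ih => simp [extract_shebang_loop, ih]

theorem loop_none (acc : List String) (ls : List String) :
    extract_shebang_loop none acc ls =
      match extract_shebang_findIdx ls with
      | none => (none, acc ++ ls)
      | some idx =>
          (ls[idx]?.getD "", acc ++ (ls.take idx ++ ls.drop (idx + 1))) := by
  induction ls generalizing acc with
  | nil => simp [extract_shebang_loop, extract_shebang_findIdx]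
  | cons l rest ih =>
    by_cases h : PySem.Chars.startswith l.toList ['#', '!'] = true
    · simp [extract_shebang_loop, extract_shebang_findIdx, h, loop_some]
    · simp only [extract_shebang_loop, extract_shebang_findIdx, h]
      rw [if_neg (by simp [h])]
      rw [ih]
      cases hf : extract_shebang_findIdx rest with
      | none => simp [h]
      | some j => simp [h, List.take_succ_cons]

-- ===== VERDICT (by name: the statement is the Claim_ definition above) =====
theorem extract_shebang_spec : Claim_equal_extract_shebang := by
  intro lines _
  unfold Spec_extract_shebang extract_shebang extract_shebang_alt
  rw [loop_none]
  cases hf : extract_shebang_findIdx lines with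
  | none => simp
  | some idx =>
      have h1 : ((idx : Int) + 1) = ((idx + 1 : Nat) : Int) := by push_cast; ring
      simp only [h1, PySem.List.slice_to_natCast, PySem.List.slice_from_natCast]
      simp
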